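-- pv_equiv track=rewrite | github.com/HeeSungP/Project-Building-heatloss-analysis | src_3.py | find_threshold
-- ===== SOURCE A (Python) =====
-- from collections import Counter
--
-- def find_threshold(lst):
--     lst_count=Counter([x for x in lst if x >= 150])
--     lst_count_sort= sorted(lst_count)
--
--     temp_class_list = [0 for _ in range(279)]
--     for x in lst:
--         temp_class_list[x] += 1
--
--     first_max, second_max = lst_count.most_common(2)[0][0], lst_count.most_common(2)[1][0]
--
--     count_min = min(temp_class_list[min(first_max,second_max) : max(first_max,second_max)])
--     results = []
--     for i in range(len(temp_class_list)):
--         if min(first_max,second_max) <= i < max(first_max,second_max):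
--             if temp_class_list[i]==count_min:
--                 results.append(i)
--
--     result = int(sum(results)/len(results))
--     return result
-- ===== SOURCE B (Python) =====
-- from collections import Counter
--
-- def find_threshold(lst):
--     lst_count = Counter([x for x in lst if x >= 150])
--     temp_class_list = [0] * 279
--     for x in lst:
--         temp_class_list[x] += 1
--     top2 = lst_count.most_common(2)
--     lo = min(top2[0][0], top2[1][0])
--     hi = max(top2[0][0], top2[1][0])
--     best = None
--     pos_sum = 0
--     pos_count = 0
--     for i in range(lo, hi):
--         v = temp_class_list[i]
--         if best is None or v < best:
--             best, pos_sum, pos_count = v, i, 1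
--         elif v == best:
--             pos_sum += i
--             pos_count += 1
--     return pos_sum // pos_count
-- ===== Notes on version B (the rewrite author's own statement) =====
-- stated objective: alternative
-- what changed: B keeps the Counter/most_common/histogram front end (so all exceptions match) but replaces A's three-stage tail (min() over a slice, a second filter pass over all 279 bins with a bounds test, then sum/len with float division) by one fused scan over range(lo,hi) that maintains the running minimum, the sum of its positions and their count, and drops the dead sorted() call.
import Mathlib
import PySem

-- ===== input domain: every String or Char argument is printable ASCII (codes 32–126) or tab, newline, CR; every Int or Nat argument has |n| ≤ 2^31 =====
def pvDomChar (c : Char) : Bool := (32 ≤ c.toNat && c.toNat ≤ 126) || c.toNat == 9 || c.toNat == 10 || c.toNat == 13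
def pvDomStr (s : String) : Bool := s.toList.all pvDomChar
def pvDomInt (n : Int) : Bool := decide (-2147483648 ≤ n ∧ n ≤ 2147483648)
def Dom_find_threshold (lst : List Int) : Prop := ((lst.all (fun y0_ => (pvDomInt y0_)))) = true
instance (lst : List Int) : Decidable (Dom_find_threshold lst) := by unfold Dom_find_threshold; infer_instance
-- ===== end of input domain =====

-- B keeps A's Counter/most_common/histogram front end but fuses A's three-stage tail
-- (min over a slice, a filter pass over all 279 bins, sum/len) into a single scan; same values everywhere A returns.

-- ===== PORT A =====
-- int(sum/len) is ported as Int.tdiv (truncating division): both operands are nonnegative here and the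
-- float division of these small integers is exact, so truncation matches Python's int() exactly.
def find_threshold (lst : List Int) : Int :=
  let lst_count := PySem.Dict.counter (lst.filter (fun x => decide (150 ≤ x)))
  let _lst_count_sort := PySem.List.sorted lst_count.keys (fun k => k) false
  let temp0 : List Int := (List.range 279).map (fun _ => (0 : Int))
  let temp := lst.foldl (fun t x => PySem.List.pySetD t x (PySem.List.pyGetD t x 0 + 1)) temp0
  let mc := PySem.List.sorted lst_count.items (fun kv => kv.2) true
  let first_max := (PySem.List.pyGetD mc 0 (0, 0)).1
  let second_max := (PySem.List.pyGetD mc 1 (0, 0)).1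
  let count_min := (PySem.List.min? (PySem.List.slice temp (some (min first_max second_max)) (some (max first_max second_max))) (fun v => v)).getD 0
  let results := (PySem.List.pyRange 0 (temp.length : Int)).foldl
      (fun rs i => if min first_max second_max ≤ i ∧ i < max first_max second_max then
                     (if PySem.List.pyGetD temp i 0 = count_min then rs ++ [i] else rs)
                   else rs) []
  Int.tdiv results.sum (results.length : Int)

-- ===== PORT B =====
-- the body of B's fused loop ('best is None or v < best' / 'v == best' update)
def find_threshold_alt_step (temp : List Int) (st : Option Int × Int × Int) (i : Int) :
    Option Int × Int × Int :=
  let v := PySem.List.pyGetD temp i 0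
  match st with
  | (none, _, _) => (some v, i, 1)
  | (some b, s, c) =>
    if v < b then (some v, i, 1)
    else if v = b then (some b, s + i, c + 1)
    else (some b, s, c)

def find_threshold_alt (lst : List Int) : Int :=
  let lst_count := PySem.Dict.counter (lst.filter (fun x => decide (150 ≤ x)))
  let temp := lst.foldl (fun t x => PySem.List.pySetD t x (PySem.List.pyGetD t x 0 + 1))
      (List.replicate 279 (0 : Int))
  let top2 := PySem.List.sorted lst_count.items (fun kv => kv.2) true
  let lo := min (PySem.List.pyGetD top2 0 (0, 0)).1 (PySem.List.pyGetD top2 1 (0, 0)).1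
  let hi := max (PySem.List.pyGetD top2 0 (0, 0)).1 (PySem.List.pyGetD top2 1 (0, 0)).1
  let st := (PySem.List.pyRange lo hi).foldl (find_threshold_alt_step temp) (none, 0, 0)
  PySem.Int.floordiv st.2.1 st.2.2

-- ===== PRECONDITION & SPEC =====
-- Pre_ excludes exactly the inputs where Python A raises: an element that is not a valid (possibly
-- negative) index into the 279-bin list (IndexError), or fewer than two distinct elements ≥ 150
-- (IndexError on most_common(2)[1]).
def Pre_find_threshold (lst : List Int) : Prop :=
  (∀ x ∈ lst, -279 ≤ x ∧ x ≤ 278) ∧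
  2 ≤ (PySem.Set.ofList (lst.filter (fun x => decide (150 ≤ x)))).length
instance (lst : List Int) : Decidable (Pre_find_threshold lst) := by
  unfold Pre_find_threshold; infer_instance
def pvWitness_find_threshold : List Int := [150, 151]

def Spec_find_threshold (lst : List Int) (out : Int) : Prop := out = find_threshold_alt lst
instance (lst : List Int) (out : Int) : Decidable (Spec_find_threshold lst out) := by unfold Spec_find_threshold; infer_instance

-- ===== CLAIM (what is proved, stated in full; the proofs are below) =====
def Claim_equal_find_threshold : Prop := ∀ (lst : List Int), Dom_find_threshold lst → Pre_find_threshold lst → Spec_find_threshold lst (find_threshold lst)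

-- ===== LEMMAS AND PROOFS =====

-- abbreviations used only by the proofs
def pvG (t : List Int) (i : Int) : Int := PySem.List.pyGetD t i 0
def pvMin (t : List Int) (m : Int) (xs : List Int) : Int :=
  xs.foldl (fun b j => min b (pvG t j)) m
def pvFil (t : List Int) (M : Int) (xs : List Int) : List Int :=
  xs.filter (fun j => decide (pvG t j = M))

theorem pvMin_le_init (t : List Int) : ∀ (xs : List Int) (m : Int), pvMin t m xs ≤ m := by
  intro xs
  induction xs with
  | nil => intro m; simp [pvMin]
  | cons j xs ih =>
    intro m
    have h := ih (min m (pvG t j))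
    simp only [pvMin, List.foldl_cons] at h ⊢
    exact le_trans h (min_le_left _ _)

theorem pvMin_attained (t : List Int) : ∀ (xs : List Int) (m : Int),
    pvMin t m xs = m ∨ ∃ j ∈ xs, pvMin t m xs = pvG t j := by
  intro xs
  induction xs with
  | nil => intro m; left; simp [pvMin]
  | cons j xs ih =>
    intro m
    have h : pvMin t m (j :: xs) = pvMin t (min m (pvG t j)) xs := by
      simp [pvMin]
    rcases ih (min m (pvG t j)) with h0 | ⟨k, hk, hke⟩
    · rcases le_total m (pvG t j) with hle | hle
      · left; rw [h, h0, min_eq_left hle]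
      · right; exact ⟨j, by simp, by rw [h, h0, min_eq_right hle]⟩
    · right; exact ⟨k, by simp [hk], by rw [h, hke]⟩

theorem pv_fuse_some (t : List Int) : ∀ (xs : List Int) (m s c : Int),
    xs.foldl (find_threshold_alt_step t) (some m, s, c) =
      (some (pvMin t m xs),
       (if m = pvMin t m xs then s else 0) + (pvFil t (pvMin t m xs) xs).sum,
       (if m = pvMin t m xs then c else 0) + ((pvFil t (pvMin t m xs) xs).length : Int)) := by
  intro xs
  induction xs with
  | nil => intro m s c; simp [pvMin, pvFil]
  | cons j xs ih =>
    intro m s c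
    have hM : pvMin t m (j :: xs) = pvMin t (min m (pvG t j)) xs := by simp [pvMin]
    have hfil : ∀ M : Int, pvFil t M (j :: xs)
        = if pvG t j = M then j :: pvFil t M xs else pvFil t M xs := by
      intro M
      by_cases hj : pvG t j = M <;> simp [pvFil, List.filter_cons, hj]
    have e : PySem.List.pyGetD t j 0 = pvG t j := rfl
    rcases lt_trichotomy (pvG t j) m with hlt | heq | hgt
    · have hlt' : PySem.List.pyGetD t j 0 < m := by rw [e]; exact hlt
      have hstep : find_threshold_alt_step t (some m, s, c) j = (some (pvG t j), j, 1) := by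
        simp only [find_threshold_alt_step]
        rw [if_pos hlt', e]
      have hmin : min m (pvG t j) = pvG t j := min_eq_right (le_of_lt hlt)
      have hle : pvMin t (pvG t j) xs ≤ pvG t j := pvMin_le_init t xs _
      have hne : ¬ (m = pvMin t (pvG t j) xs) := by omega
      rw [List.foldl_cons, hstep, ih, hM, hmin, if_neg hne, if_neg hne, hfil]
      by_cases hj : pvG t j = pvMin t (pvG t j) xs
      · rw [if_pos hj, if_pos hj, if_pos hj]
        all_goals simp only [Prod.mk.injEq, List.sum_cons, List.length_cons,
          eq_self_iff_true, true_and, and_true] <;> (push_cast; omega)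
      · rw [if_neg hj, if_neg hj, if_neg hj]
        all_goals simp only [Prod.mk.injEq, eq_self_iff_true, true_and, and_true] <;>
          (push_cast; omega)
    · have h1' : ¬ (PySem.List.pyGetD t j 0 < m) := by rw [e]; omega
      have h2' : PySem.List.pyGetD t j 0 = m := by rw [e]; exact heq
      have hstep : find_threshold_alt_step t (some m, s, c) j = (some m, s + j, c + 1) := by
        simp only [find_threshold_alt_step]
        rw [if_neg h1', if_pos h2']
      have hmin : min m (pvG t j) = m := by rw [heq, min_self]
      rw [List.foldl_cons, hstep, ih, hM, hmin, hfil]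
      by_cases hm : m = pvMin t m xs
      · rw [if_pos hm, if_pos hm, if_pos hm, if_pos hm, if_pos (heq.trans hm)]
        all_goals simp only [Prod.mk.injEq, List.sum_cons, List.length_cons,
          eq_self_iff_true, true_and, and_true] <;> (push_cast; omega)
      · have hj : ¬ (pvG t j = pvMin t m xs) := by rw [heq]; exact hm
        rw [if_neg hm, if_neg hm, if_neg hm, if_neg hm, if_neg hj]
    · have h1' : ¬ (PySem.List.pyGetD t j 0 < m) := by rw [e]; omega
      have h2' : ¬ (PySem.List.pyGetD t j 0 = m) := by rw [e]; omega
      have hstep : find_threshold_alt_step t (some m, s, c) j = (some m, s, c) := by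
        simp only [find_threshold_alt_step]
        rw [if_neg h1', if_neg h2']
      have hmin : min m (pvG t j) = m := min_eq_left (le_of_lt hgt)
      have hle : pvMin t m xs ≤ m := pvMin_le_init t xs _
      have hj : ¬ (pvG t j = pvMin t m xs) := by omega
      rw [List.foldl_cons, hstep, ih, hM, hmin, hfil, if_neg hj]

-- slice t lo hi = the bin values over range(lo,hi)
theorem pv_map_range (t : List Int) : ∀ (n : Nat) (a : Int), 0 ≤ a → a + n ≤ (t.length : Int) →
    (PySem.List.pyRange a (a + n)).map (pvG t) = (t.drop a.toNat).take n := by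
  intro n
  induction n with
  | zero => intro a h0 h1; simp [PySem.List.pyRange_one_eq_nil (le_refl a)]
  | succ n ih =>
    intro a h0 h1
    have hab : a < a + ((n + 1 : Nat) : Int) := by push_cast; omega
    rw [PySem.List.pyRange_one_cons hab, List.map_cons]
    have h2 : a + ((n + 1 : Nat) : Int) = (a + 1) + (n : Int) := by push_cast; ring
    rw [h2, ih (a + 1) (by omega) (by push_cast at h1 ⊢; omega)]
    have hlt : a.toNat < t.length := by omega
    rw [List.drop_eq_getElem_cons hlt]
    have hnat : (a + 1).toNat = a.toNat + 1 := by omega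
    rw [hnat, List.take_succ_cons]
    have hg : pvG t a = t[a.toNat] := PySem.List.pyGetD_eq_getElem t 0 h0 (by omega)
    rw [hg]

-- collecting loop = filter
theorem pv_foldl_collect (t : List Int) (M : Int) : ∀ (l : List Int) (acc : List Int),
    l.foldl (fun rs i => if pvG t i = M then rs ++ [i] else rs) acc = acc ++ pvFil t M l := by
  intro l
  induction l with
  | nil => intro acc; simp [pvFil]
  | cons j l ih =>
    intro acc
    by_cases hj : pvG t j = M <;> simp [pvFil, hj, ih, List.filter_cons] <;> simp [pvFil] at ih ⊢ <;> simp [ih]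

-- the generalized tail equality
theorem pv_tail_eq (t : List Int) (lo hi : Int) (h0 : 0 ≤ lo) (hlt : lo < hi)
    (hhi : hi ≤ (t.length : Int)) :
    Int.tdiv
      (((PySem.List.pyRange 0 (t.length : Int)).foldl
        (fun rs i => if lo ≤ i ∧ i < hi then
            (if PySem.List.pyGetD t i 0 =
                ((PySem.List.min? (PySem.List.slice t (some lo) (some hi)) (fun v => v)).getD 0)
             then rs ++ [i] else rs)
          else rs) ([] : List Int)).sum)
      ((((PySem.List.pyRange 0 (t.length : Int)).foldl
        (fun rs i => if lo ≤ i ∧ i < hi then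
            (if PySem.List.pyGetD t i 0 =
                ((PySem.List.min? (PySem.List.slice t (some lo) (some hi)) (fun v => v)).getD 0)
             then rs ++ [i] else rs)
          else rs) ([] : List Int)).length : Int))
    = PySem.Int.floordiv
        (((PySem.List.pyRange lo hi).foldl (find_threshold_alt_step t) (none, 0, 0)).2.1)
        (((PySem.List.pyRange lo hi).foldl (find_threshold_alt_step t) (none, 0, 0)).2.2) := by
  set M := (PySem.List.min? (PySem.List.slice t (some lo) (some hi)) (fun v => v)).getD 0 with hMdef
  set F := fun (rs : List Int) (i : Int) =>
    if lo ≤ i ∧ i < hi then (if PySem.List.pyGetD t i 0 = M then rs ++ [i] else rs) else rs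
    with hF
  have hR : PySem.List.pyRange lo hi = lo :: PySem.List.pyRange (lo + 1) hi :=
    PySem.List.pyRange_one_cons hlt
  have hn : lo + (((hi - lo).toNat : Nat) : Int) = hi := by omega
  have hsl : PySem.List.slice t (some lo) (some hi) = (PySem.List.pyRange lo hi).map (pvG t) := by
    rw [PySem.List.slice_toNat t h0 (by omega)]
    have hm := pv_map_range t (hi - lo).toNat lo h0 (by omega)
    rw [hn] at hm
    rw [hm]
    congr 1
    omega
  have hMval : M = pvMin t (pvG t lo) (PySem.List.pyRange (lo + 1) hi) := by
    rw [hMdef, hsl, hR, List.map_cons, PySem.List.min?_id_cons, Option.getD_some, List.foldl_map]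
    rfl
  have hskip : ∀ (l : List Int) (acc : List Int), (∀ i ∈ l, ¬ (lo ≤ i ∧ i < hi)) →
      l.foldl F acc = acc := by
    intro l
    induction l with
    | nil => intro acc _; rfl
    | cons j l ih =>
      intro acc h
      rw [List.foldl_cons]
      have hj := h j (by simp)
      have : F acc j = acc := by rw [hF]; exact if_neg hj
      rw [this]
      exact ih acc (fun i hmem => h i (by simp [hmem]))
  have hmid : ∀ acc : List Int, (PySem.List.pyRange lo hi).foldl F acc
      = acc ++ pvFil t M (PySem.List.pyRange lo hi) := by
    intro acc
    have hcg := PySem.List.foldl_congr_mem (PySem.List.pyRange lo hi) F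
      (fun rs i => if pvG t i = M then rs ++ [i] else rs) acc ?_
    · rw [hcg]; exact pv_foldl_collect t M _ acc
    · intro a i hi2
      rw [PySem.List.mem_pyRange_one] at hi2
      show (if lo ≤ i ∧ i < hi then (if PySem.List.pyGetD t i 0 = M then a ++ [i] else a) else a)
          = (if pvG t i = M then a ++ [i] else a)
      rw [if_pos hi2]
      rfl
  have hsplit : PySem.List.pyRange 0 (t.length : Int)
      = PySem.List.pyRange 0 lo ++ (PySem.List.pyRange lo hi ++ PySem.List.pyRange hi (t.length : Int)) := by
    rw [← PySem.List.pyRange_one_append lo hi (t.length : Int) (le_of_lt hlt) hhi,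
        ← PySem.List.pyRange_one_append 0 lo (t.length : Int) h0 (by omega)]
  have hres : (PySem.List.pyRange 0 (t.length : Int)).foldl F ([] : List Int)
      = pvFil t M (PySem.List.pyRange lo hi) := by
    rw [hsplit, List.foldl_append, List.foldl_append]
    rw [hskip _ ([] : List Int) (fun i hmem => by
      rw [PySem.List.mem_pyRange_one] at hmem; omega)]
    rw [hmid ([] : List Int), List.nil_append]
    exact hskip _ _ (fun i hmem => by rw [PySem.List.mem_pyRange_one] at hmem; omega)
  have hfilcons : pvFil t M (PySem.List.pyRange lo hi)
      = if pvG t lo = M then lo :: pvFil t M (PySem.List.pyRange (lo + 1) hi)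
        else pvFil t M (PySem.List.pyRange (lo + 1) hi) := by
    rw [hR]
    by_cases hj : pvG t lo = M <;> simp [pvFil, List.filter_cons, hj]
  have hB : (PySem.List.pyRange lo hi).foldl (find_threshold_alt_step t) (none, 0, 0)
      = (some M, (pvFil t M (PySem.List.pyRange lo hi)).sum,
         ((pvFil t M (PySem.List.pyRange lo hi)).length : Int)) := by
    rw [hR, List.foldl_cons]
    have hstep0 : find_threshold_alt_step t (none, 0, 0) lo = (some (pvG t lo), lo, 1) := rfl
    rw [hstep0, pv_fuse_some, ← hMval]
    have hfc : pvFil t M (lo :: PySem.List.pyRange (lo + 1) hi)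
        = if pvG t lo = M then lo :: pvFil t M (PySem.List.pyRange (lo + 1) hi)
          else pvFil t M (PySem.List.pyRange (lo + 1) hi) := by
      by_cases hj : pvG t lo = M <;> simp [pvFil, List.filter_cons, hj]
    rw [hfc]
    by_cases hj : pvG t lo = M
    · rw [if_pos hj, if_pos hj, if_pos hj]
      all_goals simp only [Prod.mk.injEq, List.sum_cons, List.length_cons,
        eq_self_iff_true, true_and, and_true] <;> (push_cast; omega)
    · rw [if_neg hj, if_neg hj, if_neg hj]
      all_goals simp only [Prod.mk.injEq, eq_self_iff_true, true_and, and_true] <;>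
        (push_cast; omega)
  have hmem_of_fil : ∀ i ∈ pvFil t M (PySem.List.pyRange lo hi), lo ≤ i ∧ i < hi := by
    intro i hmem
    have := (List.mem_filter.1 hmem).1
    exact PySem.List.mem_pyRange_one.1 this
  have hpos : 0 < (pvFil t M (PySem.List.pyRange lo hi)).length := by
    rcases pvMin_attained t (PySem.List.pyRange (lo + 1) hi) (pvG t lo) with hc | ⟨j, hjm, hje⟩
    · apply List.length_pos_of_mem (a := lo)
      rw [hfilcons, if_pos (by rw [hMval, hc])]
      simp
    · apply List.length_pos_of_mem (a := j)
      apply List.mem_filter.2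
      refine ⟨?_, ?_⟩
      · rw [hR]
        simp [hjm]
      · simp only [decide_eq_true_eq]
        exact (hMval.trans hje).symm
  have hsum : 0 ≤ (pvFil t M (PySem.List.pyRange lo hi)).sum :=
    List.sum_nonneg (fun i hmem => by have := hmem_of_fil i hmem; omega)
  rw [hres, hB]
  have hlen_pos : (0 : Int) < ((pvFil t M (PySem.List.pyRange lo hi)).length : Int) := by
    exact_mod_cast hpos
  rw [PySem.Int.floordiv_eq_ediv_of_pos hlen_pos, Int.tdiv_eq_ediv]
  simp [hsum]

-- ===== VERDICT (by name: the statement is the Claim_ definition above) =====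
theorem find_threshold_spec : Claim_equal_find_threshold := by
  intro lst _hdom hpre
  unfold Spec_find_threshold
  obtain ⟨hidx, hcard⟩ := hpre
  unfold find_threshold find_threshold_alt
  simp only []
  have htemp0 : (List.range 279).map (fun _ => (0 : Int)) = List.replicate 279 (0 : Int) := by
    rw [List.map_const', List.length_range]
  rw [htemp0]
  set fl := lst.filter (fun x => decide (150 ≤ x)) with hfl
  set mc := PySem.List.sorted (PySem.Dict.counter fl).items (fun kv => kv.2) true with hmc
  have hlen2 : 2 ≤ mc.length := by
    rw [hmc, PySem.List.length_sorted, PySem.Dict.items_counter, List.length_map]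
    exact hcard
  have h0lt : 0 < mc.length := by omega
  have h1lt : 1 < mc.length := by omega
  have hget0 : PySem.List.pyGetD mc 0 ((0 : Int), (0 : Int)) = mc[0] := by
    rw [PySem.List.pyGetD_ofNat' mc 0]
    exact List.getD_eq_getElem mc _ h0lt
  have hget1 : PySem.List.pyGetD mc 1 ((0 : Int), (0 : Int)) = mc[1] := by
    rw [PySem.List.pyGetD_ofNat' mc 1]
    exact List.getD_eq_getElem mc _ h1lt
  have hrep : ∀ p ∈ (PySem.Dict.counter fl).items, p.1 ∈ fl ∧ p = (p.1, (fl.count p.1 : Int)) := by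
    intro p hp
    rw [PySem.Dict.items_counter] at hp
    obtain ⟨k, hk, rfl⟩ := List.mem_map.1 hp
    exact ⟨(PySem.Set.mem_ofList fl k).1 hk, rfl⟩
  have hmem0 : mc[0] ∈ (PySem.Dict.counter fl).items :=
    (PySem.List.sorted_perm _ _ _).subset (List.getElem_mem h0lt)
  have hmem1 : mc[1] ∈ (PySem.Dict.counter fl).items :=
    (PySem.List.sorted_perm _ _ _).subset (List.getElem_mem h1lt)
  have hbound : ∀ p ∈ (PySem.Dict.counter fl).items, 150 ≤ p.1 ∧ p.1 ≤ 278 := by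
    intro p hp
    have h1 := (hrep p hp).1
    rw [hfl, List.mem_filter] at h1
    have h150 : (150 : Int) ≤ p.1 := of_decide_eq_true h1.2
    have := hidx p.1 h1.1
    exact ⟨h150, this.2⟩
  have hb0 := hbound _ hmem0
  have hb1 := hbound _ hmem1
  have hnodup : mc.Nodup := by
    have hinj : Function.Injective (fun k : Int => (k, (fl.count k : Int))) := by
      intro a b h
      simpa using congrArg Prod.fst h
    have hitems : (PySem.Dict.counter fl).items.Nodup := by
      rw [PySem.Dict.items_counter]
      exact (PySem.Set.nodup_ofList fl).map hinj
    exact ((PySem.List.sorted_perm _ _ _).nodup_iff).2 hitems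
  have hne01 : mc[0] ≠ mc[1] := by
    intro he
    have := (hnodup.getElem_inj_iff (hi := h0lt) (hj := h1lt)).1 he
    omega
  have hk01 : mc[0].1 ≠ mc[1].1 := by
    intro he
    apply hne01
    have r0 := (hrep _ hmem0).2
    have r1 := (hrep _ hmem1).2
    rw [r0, r1, he]
  rw [hget0, hget1]
  have hlenfold : ∀ (l : List Int) (t0 : List Int),
      (l.foldl (fun t x => PySem.List.pySetD t x (PySem.List.pyGetD t x 0 + 1)) t0).length
        = t0.length := by
    intro l
    induction l with
    | nil => intro t0; rfl
    | cons x l ih =>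
      intro t0
      rw [List.foldl_cons, ih, PySem.List.length_pySetD]
  set t := lst.foldl (fun t x => PySem.List.pySetD t x (PySem.List.pyGetD t x 0 + 1))
      (List.replicate 279 (0 : Int)) with hT
  have htl : t.length = 279 := by
    rw [hT, hlenfold, List.length_replicate]
  have hmaxle : max mc[0].1 mc[1].1 ≤ (t.length : Int) := by
    rw [htl]
    exact le_trans (max_le hb0.2 hb1.2) (by norm_num)
  exact pv_tail_eq t (min mc[0].1 mc[1].1) (max mc[0].1 mc[1].1)
    (le_min (by omega) (by omega)) (min_lt_max.2 hk01) hmaxle
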